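-- pv_equiv track=rewrite | github.com/veronica-zdanovich/code-challenges-public | jumpGame/jump_game.py | can_jump_to_zero
-- ===== SOURCE A (Python) =====
-- from typing import List
--
-- def can_jump_to_zero(arr: List[int], index: int) -> bool:
--     if arr[index] < 0:
--         return False
--
--     if arr[index] == 0:
--         return True
--
--     right_jump_index = index + arr[index]
--     left_jump_index = index - arr[index]
--
--     arr[index] = -1
--     if right_jump_index < len(arr):
--         if can_jump_to_zero(arr, right_jump_index):
--             return True
--
--     if left_jump_index >= 0:
--         if can_jump_to_zero(arr, left_jump_index):
--             return True
--
--     return False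
-- ===== SOURCE B (Python) =====
-- from typing import List
--
-- def can_jump_to_zero(arr: List[int], index: int) -> bool:
--     # Iterative DFS with an explicit stack; mutates arr (marks visited cells -1) like the original.
--     stack = [index]
--     while stack:
--         i = stack.pop()
--         v = arr[i]
--         if v < 0:
--             continue
--         if v == 0:
--             return True
--         arr[i] = -1
--         left = i - v
--         right = i + v
--         if left >= 0:
--             stack.append(left)
--         if right < len(arr):
--             stack.append(right)
--     return False
-- ===== Notes on version B (the rewrite author's own statement) =====
-- stated objective: alternative
-- what changed: A's recursive depth-first search is replaced by an iterative DFS driven by an explicit stack of indices (push left then right so right is explored first), with the same in-place marking of visited cells; this removes recursion entirely while preserving the exact visiting order and early-return point.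
import Mathlib
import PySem

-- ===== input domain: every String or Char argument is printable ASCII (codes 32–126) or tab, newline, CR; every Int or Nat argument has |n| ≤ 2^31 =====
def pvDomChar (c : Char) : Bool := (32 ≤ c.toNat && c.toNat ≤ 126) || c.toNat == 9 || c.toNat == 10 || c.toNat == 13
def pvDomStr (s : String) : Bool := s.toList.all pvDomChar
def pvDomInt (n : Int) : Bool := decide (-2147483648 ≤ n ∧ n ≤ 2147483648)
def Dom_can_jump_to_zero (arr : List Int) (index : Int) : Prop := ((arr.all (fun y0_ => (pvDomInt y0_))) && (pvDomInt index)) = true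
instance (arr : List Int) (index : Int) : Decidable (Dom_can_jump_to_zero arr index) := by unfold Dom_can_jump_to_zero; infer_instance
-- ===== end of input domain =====

-- B replaces A's recursive DFS by an iterative DFS over an explicit stack of indices (same visiting
-- order and same in-place marking of arr to -1; both Pythons mutate arr identically, the theorems
-- are about the return value). Fuel in the ports is a totality guard only, proved sufficient below.

-- number of positive entries: bounds the number of marking steps (used as the fuel guard)
def pvPos (arr : List Int) : Nat := (arr.filter (fun x => 0 < x)).length

-- ===== PORT A =====
-- recursion threads the mutated list (Python mutates arr in place); fuel = totality guard only
def can_jump_go : Nat → List Int → Int → Bool × List Int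
  | 0, arr, _ => (false, arr)
  | fuel+1, arr, index =>
    let v := PySem.List.pyGetD arr index 0
    if v < 0 then (false, arr)
    else if v = 0 then (true, arr)
    else
      let right := index + v
      let left := index - v
      let arr1 := PySem.List.pySetD arr index (-1)
      let p := if right < (arr1.length : Int) then can_jump_go fuel arr1 right else (false, arr1)
      if p.1 then (true, p.2)
      else if 0 ≤ left then can_jump_go fuel p.2 left
      else (false, p.2)


def can_jump_to_zero (arr : List Int) (index : Int) : Bool :=
  (can_jump_go (pvPos arr + 1) arr index).1

-- ===== PORT B =====
-- explicit stack, head = top of stack (Python list.pop pops the last appended element)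
def can_jump_loop : Nat → List Int → List Int → Bool
  | 0, _, _ => false
  | _+1, _, [] => false
  | fuel+1, arr, i :: st =>
    let v := PySem.List.pyGetD arr i 0
    if v < 0 then can_jump_loop fuel arr st
    else if v = 0 then true
    else
      let arr1 := PySem.List.pySetD arr i (-1)
      let st1 := if 0 ≤ i - v then (i - v) :: st else st
      let st2 := if i + v < (arr1.length : Int) then (i + v) :: st1 else st1
      can_jump_loop fuel arr1 st2


def can_jump_to_zero_alt (arr : List Int) (index : Int) : Bool :=
  can_jump_loop (2 * arr.length + 2) arr [index]

-- ===== PRECONDITION & SPEC =====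
-- Pre_ excludes exactly the inputs where Python raises IndexError: the start index out of range
-- (every index the jumps reach afterwards is range-checked by the code itself).
def Pre_can_jump_to_zero (arr : List Int) (index : Int) : Prop :=
  PySem.Raise.InRange arr.length index
instance (arr : List Int) (index : Int) : Decidable (Pre_can_jump_to_zero arr index) := by
  unfold Pre_can_jump_to_zero; infer_instance

def pvWitness_can_jump_to_zero : List Int × Int := ([2, 1, 3, 0, 4], 1)

def Spec_can_jump_to_zero (arr : List Int) (index : Int) (out : Bool) : Prop := out = can_jump_to_zero_alt arr index
instance (arr : List Int) (index : Int) (out : Bool) : Decidable (Spec_can_jump_to_zero arr index out) := by unfold Spec_can_jump_to_zero; infer_instance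

-- ===== CLAIM (what is proved, stated in full; the proofs are below) =====
def Claim_equal_can_jump_to_zero : Prop := ∀ (arr : List Int) (index : Int), Dom_can_jump_to_zero arr index → Pre_can_jump_to_zero arr index → Spec_can_jump_to_zero arr index (can_jump_to_zero arr index)

-- ===== LEMMAS AND PROOFS =====

-- marking position k (a real, positive cell) strictly lowers the positive count
lemma pvPos_set (arr : List Int) (k : Nat) (hk : k < arr.length) (h : 0 < arr.getD k 0) :
    pvPos (arr.set k (-1)) < pvPos arr := by
  induction arr generalizing k with
  | nil => simp at hk
  | cons a tl ih =>
    cases k with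
    | zero =>
      simp [List.getD] at h
      simp [pvPos, List.filter, h]
    | succ k =>
      simp at hk
      simp [List.getD] at h ⊢
      have := ih k hk (by simpa [List.getD] using h)
      simp [pvPos, List.filter] at this ⊢
      split <;> simpa using this


-- a positive read means the (possibly negative) index denotes a real position of a positive cell
lemma pvPos_idx (arr : List Int) (i : Int) (h : 0 < PySem.List.pyGetD arr i 0) :
    ∃ k, k < arr.length ∧ 0 < arr.getD k 0 ∧ PySem.List.pySetD arr i (-1) = arr.set k (-1) := by
  simp only [PySem.List.pyGetD, PySem.List.pyGet?, PySem.List.pySetD, PySem.List.pySet?] at *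
  rcases hk : PySem.List.pyIdx? arr.length i with _ | k
  · simp [hk] at h
  · have hlt : k < arr.length := by
      unfold PySem.List.pyIdx? at hk
      split_ifs at hk <;> simp_all <;> omega
    refine ⟨k, hlt, ?_, by simp⟩
    simpa [hk, List.getD, List.getElem?_eq_getElem hlt] using h


lemma pvPos_set_lt (arr : List Int) (i : Int) (h : 0 < PySem.List.pyGetD arr i 0) :
    pvPos (PySem.List.pySetD arr i (-1)) < pvPos arr := by
  obtain ⟨k, hlt, hp, he⟩ := pvPos_idx arr i h
  rw [he]; exact pvPos_set arr k hlt hp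


-- the mutated list never gains positive entries
lemma pvPos_go_le (fuel : Nat) : ∀ (arr : List Int) (i : Int),
    pvPos (can_jump_go fuel arr i).2 ≤ pvPos arr := by
  induction fuel with
  | zero => intro arr i; simp [can_jump_go]
  | succ f ih =>
    intro arr i
    simp only [can_jump_go]
    split
    · simp
    · split
      · simp
      · rename_i h1 h2
        have hpos : 0 < PySem.List.pyGetD arr i 0 := by omega
        have hset := pvPos_set_lt arr i hpos
        set arr1 := PySem.List.pySetD arr i (-1) with harr1
        have hp2 : pvPos (if (i + PySem.List.pyGetD arr i 0) < (arr1.length : Int) then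
            can_jump_go f arr1 (i + PySem.List.pyGetD arr i 0) else (false, arr1)).2 ≤ pvPos arr1 := by
          split
          · exact ih arr1 _
          · simp
        set p := (if (i + PySem.List.pyGetD arr i 0) < (arr1.length : Int) then
            can_jump_go f arr1 (i + PySem.List.pyGetD arr i 0) else (false, arr1))
        split
        · simpa using le_of_lt (lt_of_le_of_lt hp2 hset)
        · split
          · exact le_trans (le_trans (ih p.2 _) hp2) (le_of_lt hset)
          · simpa using le_of_lt (lt_of_le_of_lt hp2 hset)


-- fuel irrelevance for A's recursion
lemma go_fuel : ∀ (f g : Nat) (arr : List Int) (i : Int),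
    pvPos arr < f → pvPos arr < g → can_jump_go f arr i = can_jump_go g arr i := by
  intro f
  induction f with
  | zero => intro g arr i hf; omega
  | succ f ih =>
    intro g arr i hf hg
    cases g with
    | zero => omega
    | succ g =>
      simp only [can_jump_go]
      split
      · rfl
      · split
        · rfl
        · rename_i h1 h2
          have hpos : 0 < PySem.List.pyGetD arr i 0 := by omega
          have hset := pvPos_set_lt arr i hpos
          set arr1 := PySem.List.pySetD arr i (-1) with harr1
          have e1 : can_jump_go f arr1 (i + PySem.List.pyGetD arr i 0)
              = can_jump_go g arr1 (i + PySem.List.pyGetD arr i 0) := ih g arr1 _ (by omega) (by omega)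
          rw [e1]
          set p := (if (i + PySem.List.pyGetD arr i 0) < (arr1.length : Int) then
            can_jump_go g arr1 (i + PySem.List.pyGetD arr i 0) else (false, arr1)) with hp
          have hp2 : pvPos p.2 ≤ pvPos arr1 := by
            rw [hp]; split
            · rw [← e1]; exact le_trans (pvPos_go_le f arr1 _) (le_refl _)
            · simp
          split
          · rfl
          · split
            · exact ih g p.2 _ (by omega) (by omega)
            · rfl


-- fuel irrelevance for B's loop
lemma loop_fuel : ∀ (f g : Nat) (arr : List Int) (st : List Int),
    st.length + 2 * pvPos arr < f → st.length + 2 * pvPos arr < g →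
    can_jump_loop f arr st = can_jump_loop g arr st := by
  intro f
  induction f with
  | zero => intro g arr st hf; omega
  | succ f ih =>
    intro g arr st hf hg
    cases g with
    | zero => omega
    | succ g =>
      cases st with
      | nil => simp [can_jump_loop]
      | cons i st =>
        simp only [can_jump_loop]
        split
        · exact ih g arr st (by simp at hf; omega) (by simp at hg; omega)
        · split
          · rfl
          · rename_i h1 h2
            have hpos : 0 < PySem.List.pyGetD arr i 0 := by omega
            have hset := pvPos_set_lt arr i hpos
            set arr1 := PySem.List.pySetD arr i (-1) with harr1
            set st1 := if 0 ≤ i - PySem.List.pyGetD arr i 0 then (i - PySem.List.pyGetD arr i 0) :: st else st with hst1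
            set st2 := if i + PySem.List.pyGetD arr i 0 < (arr1.length : Int) then (i + PySem.List.pyGetD arr i 0) :: st1 else st1 with hst2
            have hl1 : st1.length ≤ st.length + 1 := by rw [hst1]; split <;> simp
            have hl2 : st2.length ≤ st1.length + 1 := by rw [hst2]; split <;> simp
            simp at hf hg
            exact ih g arr1 st2 (by omega) (by omega)


-- canonical-fuel versions (proof-only abbreviations)
def runA (arr : List Int) (i : Int) : Bool × List Int := can_jump_go (pvPos arr + 1) arr i
def runB (arr : List Int) (st : List Int) : Bool := can_jump_loop (st.length + 2 * pvPos arr + 1) arr st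


lemma runB_cons (arr : List Int) (i : Int) (st : List Int) :
    runB arr (i :: st) = can_jump_loop ((st.length + 2 * pvPos arr + 1) + 1) arr (i :: st) := by
  unfold runB; congr 1; simp [List.length_cons]; omega


-- simulation: popping i and running the loop = running A's DFS from i, then the loop on the rest
lemma bridge : ∀ (n : Nat) (arr : List Int), pvPos arr ≤ n → ∀ (i : Int) (st : List Int),
    runB arr (i :: st) = (if (runA arr i).1 then true else runB (runA arr i).2 st) := by
  intro n
  induction n using Nat.strong_induction_on with
  | _ n ih =>
    intro arr hn i st
    rw [runB_cons]
    simp only [can_jump_loop]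
    unfold runA
    simp only [can_jump_go]
    by_cases hv1 : PySem.List.pyGetD arr i 0 < 0
    · simp only [hv1, if_true]
      rfl
    · by_cases hv2 : PySem.List.pyGetD arr i 0 = 0
      · simp only [hv2, if_true]
        simp
      · simp only [hv1, hv2, if_false]
        have hpos : 0 < PySem.List.pyGetD arr i 0 := by omega
        have hset := pvPos_set_lt arr i hpos
        set v := PySem.List.pyGetD arr i 0 with hvdef
        set arr1 := PySem.List.pySetD arr i (-1) with harr1
        have hn1 : pvPos arr1 < n := by omega
        have hq : can_jump_go (pvPos arr) arr1 (i + v) = runA arr1 (i + v) :=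
          go_fuel _ _ arr1 _ (by omega) (by omega)
        by_cases hro : (i + v) < (arr1.length : Int)
        · simp only [hro, if_true, hq]
          set q := runA arr1 (i + v) with hqdef
          have hq2 : pvPos q.2 ≤ pvPos arr1 := pvPos_go_le _ arr1 _
          -- B side: loop fuel arr1 ((i+v)::st1) = runB arr1 ((i+v)::st1)
          set st1 := if 0 ≤ i - v then (i - v) :: st else st with hst1
          have hl1 : st1.length ≤ st.length + 1 := by rw [hst1]; split <;> simp
          have hB1 : can_jump_loop (st.length + 2 * pvPos arr + 1) arr1 ((i + v) :: st1)
              = runB arr1 ((i + v) :: st1) := by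
            unfold runB
            exact loop_fuel _ _ arr1 _ (by simp [List.length_cons]; omega) (by omega)
          rw [hB1, ih (pvPos arr1) hn1 arr1 (le_refl _) (i + v) st1]
          rw [← hqdef]
          by_cases hB : q.1
          · simp [hB]
          · simp only [hB, if_false, Bool.false_eq_true]
            by_cases hlo : 0 ≤ i - v
            · simp only [hlo, if_true, hst1]
              have hq3 : can_jump_go (pvPos arr) q.2 (i - v) = runA q.2 (i - v) :=
                go_fuel _ _ q.2 _ (by omega) (by omega)
              rw [hq3]
              exact ih (pvPos arr1) hn1 q.2 hq2 (i - v) st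
            · simp only [hlo, if_false, hst1]
              simp
        · simp only [hro, if_false]
          set st1 := if 0 ≤ i - v then (i - v) :: st else st with hst1
          by_cases hlo : 0 ≤ i - v
          · simp only [hlo, if_true, hst1]
            have hq3 : can_jump_go (pvPos arr) arr1 (i - v) = runA arr1 (i - v) :=
              go_fuel _ _ arr1 _ (by omega) (by omega)
            rw [hq3]
            have hB1 : can_jump_loop (st.length + 2 * pvPos arr + 1) arr1 ((i - v) :: st)
                = runB arr1 ((i - v) :: st) := by
              unfold runB
              exact loop_fuel _ _ arr1 _ (by simp [List.length_cons]; omega) (by omega)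
            rw [hB1]
            exact ih (pvPos arr1) hn1 arr1 (le_refl _) (i - v) st
          · simp only [hlo, if_false, hst1]
            have hB1 : can_jump_loop (st.length + 2 * pvPos arr + 1) arr1 st
                = runB arr1 st := by
              unfold runB
              exact loop_fuel _ _ arr1 _ (by omega) (by omega)
            rw [hB1]
            rfl

theorem main_eq (arr : List Int) (index : Int) :
    can_jump_to_zero arr index = can_jump_to_zero_alt arr index := by
  have hle : pvPos arr ≤ arr.length := List.length_filter_le _ _
  have h : can_jump_to_zero_alt arr index = runB arr [index] := by
    unfold can_jump_to_zero_alt runB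
    exact loop_fuel _ _ arr _ (by simp only [List.length_cons, List.length_nil]; omega) (by simp only [List.length_cons, List.length_nil]; omega)
  rw [h, bridge (pvPos arr) arr (le_refl _) index []]
  have h2 : runB (runA arr index).2 [] = false := by
    unfold runB; simp only [can_jump_loop]
  rw [h2]
  show (runA arr index).1 = _
  cases (runA arr index).1 <;> simp

-- ===== VERDICT (by name: the statement is the Claim_ definition above) =====
theorem can_jump_to_zero_spec : Claim_equal_can_jump_to_zero := by
  intro arr index _ _
  unfold Spec_can_jump_to_zero
  exact main_eq arr index
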